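-- pv_equiv track=rewrite | github.com/vasundharaaher/python- | python/balling-managment.py | find_pd
-- ===== SOURCE A (Python) =====
-- def find_pd(pd_id,pd_list):
--     fg=False
--     ind=0
--     for one in pd_list:
--         ls=one.split(",")
--         if ls[0]==pd_id:
--             fg= True
--             break
--         ind=ind+1
--     return fg,ind
-- ===== SOURCE B (Python) =====
-- def find_pd(pd_id, pd_list):
--     # Backwards fold: build the answer back-to-front. A match resets the
--     # accumulator to (True, 0); any element in front of the current answer
--     # adds 1 to the index. Not found -> (False, len(pd_list)).
--     res = (False, 0)
--     for one in reversed(pd_list):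
--         if one.split(",")[0] == pd_id:
--             res = (True, 0)
--         else:
--             res = (res[0], res[1] + 1)
--     return res
-- ===== Notes on version B (the rewrite author's own statement) =====
-- stated objective: alternative
-- what changed: Replaces the forward early-exit counting loop with a backwards fold over reversed(pd_list) that rebuilds a (found,index) accumulator back-to-front (a match resets it to (True,0), each preceding row increments the index), so the frontmost match wins with no counter and no break.
import Mathlib
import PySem

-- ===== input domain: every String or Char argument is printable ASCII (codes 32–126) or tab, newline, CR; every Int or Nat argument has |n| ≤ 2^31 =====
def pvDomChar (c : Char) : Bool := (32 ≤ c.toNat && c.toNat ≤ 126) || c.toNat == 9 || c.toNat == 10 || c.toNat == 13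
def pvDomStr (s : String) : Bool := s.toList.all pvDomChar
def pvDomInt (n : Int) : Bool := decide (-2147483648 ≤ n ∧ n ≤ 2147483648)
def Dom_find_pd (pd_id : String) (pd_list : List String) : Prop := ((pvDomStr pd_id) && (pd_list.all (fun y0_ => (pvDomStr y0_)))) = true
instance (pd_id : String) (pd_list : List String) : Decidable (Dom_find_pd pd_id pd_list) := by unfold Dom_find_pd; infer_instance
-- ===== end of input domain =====

-- B replaces A's forward early-exit counting scan with a backwards fold over the
-- reversed list rebuilding a (found, index) accumulator (objective: alternative).


-- ===== PORT A =====
-- one.split(",")[0]: split with a non-empty separator always yields a non-empty list,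
-- so Python's ls[0] never raises; headD "" is exact here.
def find_pd_first (one : String) : String := ((PySem.Str.split? one ",").getD []).headD ""

def find_pd_go (pd_id : String) : List String → Int → Bool × Int
  | [], ind => (false, ind)
  | one :: rest, ind =>
    if find_pd_first one = pd_id then (true, ind)
    else find_pd_go pd_id rest (ind + 1)

def find_pd (pd_id : String) (pd_list : List String) : Bool × Int :=
  find_pd_go pd_id pd_list 0

-- ===== PORT B =====
-- Source B's 'for one in reversed(pd_list): res = …' is a left fold over the reversed list.
def find_pd_alt_step (pd_id : String) (res : Bool × Int) (one : String) : Bool × Int :=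
  if find_pd_first one = pd_id then (true, 0) else (res.1, res.2 + 1)

def find_pd_alt (pd_id : String) (pd_list : List String) : Bool × Int :=
  pd_list.reverse.foldl (find_pd_alt_step pd_id) (false, 0)

-- ===== PRECONDITION & SPEC =====
def Spec_find_pd (pd_id : String) (pd_list : List String) (out : Bool × Int) : Prop := out = find_pd_alt pd_id pd_list
instance (pd_id : String) (pd_list : List String) (out : Bool × Int) : Decidable (Spec_find_pd pd_id pd_list out) := by unfold Spec_find_pd; infer_instance

-- ===== CLAIM (what is proved, stated in full; the proofs are below) =====
def Claim_equal_find_pd : Prop := ∀ (pd_id : String) (pd_list : List String), Dom_find_pd pd_id pd_list → Spec_find_pd pd_id pd_list (find_pd pd_id pd_list)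

-- ===== LEMMAS AND PROOFS =====
-- Unfolding B's backwards fold one element at the FRONT of the list.
lemma find_pd_alt_cons (pd_id a : String) (rest : List String) :
    find_pd_alt pd_id (a :: rest) = find_pd_alt_step pd_id (find_pd_alt pd_id rest) a := by
  simp [find_pd_alt, List.reverse_cons, List.foldl_append]

-- A's scan started at offset ind returns B's flag and B's index shifted by ind.
lemma find_pd_go_eq_alt (pd_id : String) (l : List String) (ind : Int) :
    find_pd_go pd_id l ind = ((find_pd_alt pd_id l).1, ind + (find_pd_alt pd_id l).2) := by
  induction l generalizing ind with
  | nil => simp [find_pd_go, find_pd_alt]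
  | cons a rest ih =>
    rw [find_pd_alt_cons]
    by_cases h : find_pd_first a = pd_id
    · simp [find_pd_go, find_pd_alt_step, h]
    · simp only [find_pd_go, if_neg h, ih, find_pd_alt_step]
      ring_nf

-- ===== VERDICT (by name: the statement is the Claim_ definition above) =====
theorem find_pd_spec : Claim_equal_find_pd := by
  intro pd_id pd_list _
  unfold Spec_find_pd find_pd
  rw [find_pd_go_eq_alt]
  simp
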